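-- pv_equiv track=rewrite | github.com/anewton01/Lab-9 | L93.py | frequency_first_letter
-- ===== SOURCE A (Python) =====
-- def frequency_first_letter(namelist):
--     dictionary={}
--     for thing in namelist[1::2]:
--         if thing[0] not in dictionary:
--             dictionary[thing[0]]=1
--         else:
--             dictionary[thing[0]]+=1
--     return dictionary
-- ===== SOURCE B (Python) =====
-- def frequency_first_letter(namelist):
--     firsts = [thing[0] for thing in namelist[1::2]]
--     return {c: firsts.count(c) for c in dict.fromkeys(firsts)}
-- ===== Notes on version B (the rewrite author's own statement) =====
-- stated objective: simpler
-- what changed: Replaces the running dict tally with two comprehensions: collect the first letters of odd-indexed names, dedup them in first-occurrence order with dict.fromkeys, and map each distinct letter to list.count of its occurrences.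
import Mathlib
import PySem

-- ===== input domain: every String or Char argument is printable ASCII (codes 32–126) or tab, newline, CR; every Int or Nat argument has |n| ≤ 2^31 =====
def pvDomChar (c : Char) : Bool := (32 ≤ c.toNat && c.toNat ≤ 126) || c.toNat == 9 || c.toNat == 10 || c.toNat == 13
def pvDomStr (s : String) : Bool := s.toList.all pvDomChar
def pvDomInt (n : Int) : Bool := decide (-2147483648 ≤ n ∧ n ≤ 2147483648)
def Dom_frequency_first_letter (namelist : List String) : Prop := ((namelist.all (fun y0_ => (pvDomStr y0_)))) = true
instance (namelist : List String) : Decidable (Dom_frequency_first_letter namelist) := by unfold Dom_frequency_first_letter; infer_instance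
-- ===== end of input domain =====

-- B replaces A's running dict tally by dedup-in-first-occurrence-order + count per distinct letter; return values proved equal.
-- ===== PORT A =====
-- faithful port of A: fold over namelist[1::2] building an insertion-ordered dict of counts;
-- an empty string (Python IndexError on thing[0]) leaves the dict unchanged — excluded by Pre_.
def frequency_first_letter (namelist : List String) : List (String × Int) :=
  (((PySem.List.slice? namelist (some 1) none 2).getD []).foldl
    (fun d t =>
      match PySem.Str.pyGet? t 0 with
      | none => d
      | some c =>
        if ¬ d.contains (String.ofList [c]) then d.insert (String.ofList [c]) 1
        else d.insert (String.ofList [c]) (d.getD (String.ofList [c]) 0 + 1))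
    PySem.Dict.empty).items

-- ===== PORT B =====
-- faithful port of B: firsts = [t[0] for t in namelist[1::2]] (empty strings, excluded by Pre_, skipped),
-- then {c: firsts.count(c) for c in dict.fromkeys(firsts)}.
def frequency_first_letter_alt (namelist : List String) : List (String × Int) :=
  let firsts := ((PySem.List.slice? namelist (some 1) none 2).getD []).filterMap
    (fun t => (PySem.Str.pyGet? t 0).map (fun c => String.ofList [c]))
  (PySem.List.dedup firsts).map (fun c => (c, (firsts.count c : Int)))

-- ===== PRECONDITION & SPEC =====
-- Pre_ excludes inputs with an empty string at an odd index, where Python A (and B) raise IndexError.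
def Pre_frequency_first_letter (namelist : List String) : Prop :=
  ∀ s ∈ (PySem.List.slice? namelist (some 1) none 2).getD [], s ≠ ""
instance (namelist : List String) : Decidable (Pre_frequency_first_letter namelist) := by unfold Pre_frequency_first_letter; infer_instance
def pvWitness_frequency_first_letter : List String := ["x", "Anna", "y", "ben", "z", "apple"]
def Spec_frequency_first_letter (namelist : List String) (out : List (String × Int)) : Prop := out = frequency_first_letter_alt namelist
instance (namelist : List String) (out : List (String × Int)) : Decidable (Spec_frequency_first_letter namelist out) := by unfold Spec_frequency_first_letter; infer_instance

-- ===== CLAIM (what is proved, stated in full; the proofs are below) =====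
def Claim_equal_frequency_first_letter : Prop := ∀ (namelist : List String), Dom_frequency_first_letter namelist → Pre_frequency_first_letter namelist → Spec_frequency_first_letter namelist (frequency_first_letter namelist)

-- ===== LEMMAS AND PROOFS =====

-- folding an Option-elim step is folding the plain step over the filterMap
theorem foldl_elim_filterMap {α β γ : Type} (f : α → Option β) (g : γ → β → γ) :
    ∀ (l : List α) (init : γ),
      l.foldl (fun acc t => (f t).elim acc (fun c => g acc c)) init = (l.filterMap f).foldl g init := by
  intro l
  induction l with
  | nil => intro init; rfl
  | cons x xs ih =>
    intro init
    simp only [List.foldl_cons, List.filterMap_cons]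
    cases f x <;> simp [ih]

-- A's two branches are both 'insert c (getD c 0 + 1)'
theorem step_eq_insert_getD {κ : Type} [BEq κ] [LawfulBEq κ] (d : PySem.Dict κ Int) (c : κ) :
    (if ¬ d.contains c then d.insert c 1 else d.insert c (d.getD c 0 + 1))
      = d.insert c (d.getD c 0 + 1) := by
  by_cases h : d.contains c
  · simp [h]
  · simp only [h, Bool.false_eq_true, not_false_iff, if_pos]
    rw [PySem.Dict.getD_of_not_contains d 0 (by simpa using h)]
    norm_num

-- ===== VERDICT (by name: the statement is the Claim_ definition above) =====
theorem frequency_first_letter_spec : Claim_equal_frequency_first_letter := by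
  intro namelist _ _
  unfold Spec_frequency_first_letter frequency_first_letter frequency_first_letter_alt
  have hstep :
      (fun (d : PySem.Dict String Int) (t : String) =>
        match PySem.Str.pyGet? t 0 with
        | none => d
        | some c =>
          if ¬ d.contains (String.ofList [c]) then d.insert (String.ofList [c]) 1
          else d.insert (String.ofList [c]) (d.getD (String.ofList [c]) 0 + 1))
      = (fun d t =>
        ((PySem.Str.pyGet? t 0).map (fun c => String.ofList [c])).elim d
          (fun c => d.insert c (d.getD c 0 + 1))) := by
    funext d t
    cases PySem.Str.pyGet? t 0 with
    | none => rfl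
    | some c => simpa using step_eq_insert_getD d (String.ofList [c])
  have h2 := foldl_elim_filterMap
    (fun t => (PySem.Str.pyGet? t 0).map (fun c => String.ofList [c]))
    (fun (d : PySem.Dict String Int) c => d.insert c (d.getD c 0 + 1))
    ((PySem.List.slice? namelist (some 1) none 2).getD []) PySem.Dict.empty
  rw [hstep, h2, PySem.Dict.foldl_insert_getD_add_one_eq_counter, PySem.Dict.items_counter]
  simp
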